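-- pv_equiv track=rewrite | github.com/ksparavec/traceroute_simulator | src/core/traceroute_simulator.py | _is_public_ip
-- ===== SOURCE A (Python) =====
-- import ipaddress
--
-- def _is_public_ip(ip: str) -> bool:
--     """
--     Check if an IP address is a public internet IP address.
--
--     Determines if the IP is outside of private/reserved IP ranges:
--     - RFC 1918 private networks (10.0.0.0/8, 172.16.0.0/12, 192.168.0.0/16)
--     - Link-local addresses (169.254.0.0/16)
--     - Loopback addresses (127.0.0.0/8)
--     - Multicast addresses (224.0.0.0/4)
--     - Reserved ranges
--
--     Args:
--         ip: IP address string to check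
--
--     Returns:
--         True if IP is a public internet address, False otherwise
--     """
--     try:
--         addr = ipaddress.ip_address(ip)
--
--         # IPv6 is not considered public for this simulation
--         if addr.version == 6:
--             return False
--
--         # Check if IP is in private/reserved ranges
--         private_networks = [
--             ipaddress.ip_network('10.0.0.0/8'),        # RFC 1918 Class A
--             ipaddress.ip_network('172.16.0.0/12'),     # RFC 1918 Class B
--             ipaddress.ip_network('192.168.0.0/16'),    # RFC 1918 Class C
--             ipaddress.ip_network('127.0.0.0/8'),       # Loopback
--             ipaddress.ip_network('169.254.0.0/16'),    # Link-local
--             ipaddress.ip_network('224.0.0.0/4'),       # Multicast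
--             ipaddress.ip_network('240.0.0.0/4'),       # Reserved
--             ipaddress.ip_network('0.0.0.0/8'),         # Current network
--         ]
--
--         for network in private_networks:
--             if addr in network:
--                 return False
--
--         return True  # IP is public
--
--     except (ValueError, ipaddress.AddressValueError):
--         return False  # Invalid IP is not public
-- ===== SOURCE B (Python) =====
-- def _is_public_ip(ip: str) -> bool:
--     # hand-rolled dotted-quad parse, CPython ipaddress rules: 4 parts, each 1-3 ASCII
--     # digits, no leading zero, value <= 255.  Anything else (including IPv6 text,
--     # which the original also maps to False) is not public.
--     parts = ip.split('.')
--     if len(parts) != 4: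
--         return False
--     octets = []
--     for p in parts:
--         if not 1 <= len(p) <= 3:
--             return False
--         if any(c not in '0123456789' for c in p):
--             return False
--         if len(p) > 1 and p[0] == '0':
--             return False
--         v = int(p)
--         if v > 255:
--             return False
--         octets.append(v)
--     o1, o2 = octets[0], octets[1]
--     # direct byte tests replacing the eight network-containment checks
--     if o1 == 0 or o1 == 10 or o1 == 127:
--         return False  # 0.0.0.0/8, 10.0.0.0/8, 127.0.0.0/8
--     if o1 == 172 and 16 <= o2 <= 31:
--         return False  # 172.16.0.0/12
--     if o1 == 192 and o2 == 168:
--         return False  # 192.168.0.0/16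
--     if o1 == 169 and o2 == 254:
--         return False  # 169.254.0.0/16
--     if o1 >= 224:
--         return False  # 224.0.0.0/4 and 240.0.0.0/4 merged
--     return True
-- ===== Notes on version B (the rewrite author's own statement) =====
-- stated objective: simpler
-- what changed: Drops the ipaddress library entirely: B parses the dotted quad itself (CPython's octet rules) and classifies by direct tests on the first two octets instead of building eight ip_network objects and looping over containment checks (224/4 and 240/4 merge into first octet >= 224).
import Mathlib
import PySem

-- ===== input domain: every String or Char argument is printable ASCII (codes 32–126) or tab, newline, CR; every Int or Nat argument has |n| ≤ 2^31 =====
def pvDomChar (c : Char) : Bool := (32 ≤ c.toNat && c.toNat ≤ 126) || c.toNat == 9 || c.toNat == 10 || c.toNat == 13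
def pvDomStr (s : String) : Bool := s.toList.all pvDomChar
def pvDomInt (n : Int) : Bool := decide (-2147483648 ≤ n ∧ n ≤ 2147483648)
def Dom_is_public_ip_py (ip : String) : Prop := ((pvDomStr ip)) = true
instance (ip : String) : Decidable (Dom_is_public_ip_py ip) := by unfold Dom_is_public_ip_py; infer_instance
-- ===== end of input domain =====

-- B drops the ipaddress machinery: it parses the dotted quad itself and classifies by direct first/second-octet tests instead of eight per-call ip_network containment checks (simpler; constant-factor speed mechanism, measured when resolution allows).


-- shared model of `ipaddress.ip_address(ip)` restricted to IPv4 (both Pythons call it):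
-- one dotted-quad octet, exact CPython rules: nonempty, ≤3 ASCII digits, no leading zero, value ≤ 255
def pvParseOctet (cs : List Char) : Option Int :=
  if cs.length = 0 then none
  else if 3 < cs.length then none
  else if ¬ cs.all PySem.Chars.isdigit then none
  else if 1 < cs.length ∧ cs.headI = '0' then none
  else if 255 < cs.foldl (fun a c => a * 10 + ((c.toNat : Int) - 48)) 0 then none
  else some (cs.foldl (fun a c => a * 10 + ((c.toNat : Int) - 48)) 0)

-- `none` covers exactly ValueError AND valid-IPv6 input; in BOTH Pythons each of those returns False
-- (A via `except`/`version == 6`, B the same), so both ports map `none` to false.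
def pvParseIPv4 (ip : String) : Option (Int × Int × Int × Int) :=
  match PySem.Chars.splitOn ip.toList ['.'] with
  | [p1, p2, p3, p4] =>
    match pvParseOctet p1, pvParseOctet p2, pvParseOctet p3, pvParseOctet p4 with
    | some a, some b, some c, some d => some (a, b, c, d)
    | _, _, _, _ => none
  | _ => none

-- ===== PORT A =====
-- the eight private_networks as (network-address integer, prefix length), in A's order
def pvNetworks : List (Int × Nat) :=
  [(167772160, 8), (2886729728, 12), (3232235520, 16), (2130706432, 8),
   (2851995648, 16), (3758096384, 4), (4026531840, 4), (0, 8)]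

-- `addr in network`: the address and the network address agree on the top prefixlen bits
def pvInNetwork (n : Int) (nw : Int × Nat) : Bool :=
  PySem.Int.floordiv n (2 ^ (32 - nw.2)) == PySem.Int.floordiv nw.1 (2 ^ (32 - nw.2))

def is_public_ip_py (ip : String) : Bool :=
  match pvParseIPv4 ip with
  | none => false
  | some (o1, o2, o3, o4) =>
    let n := ((o1 * 256 + o2) * 256 + o3) * 256 + o4  -- int(addr)
    if pvNetworks.any (pvInNetwork n) then false       -- for network …: if addr in network: return False
    else true

-- ===== PORT B =====
def is_public_ip_py_alt (ip : String) : Bool :=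
  match pvParseIPv4 ip with
  | none => false
  | some (o1, o2, _, _) =>
    if o1 = 0 ∨ o1 = 10 ∨ o1 = 127 then false
    else if o1 = 172 ∧ 16 ≤ o2 ∧ o2 ≤ 31 then false
    else if o1 = 192 ∧ o2 = 168 then false
    else if o1 = 169 ∧ o2 = 254 then false
    else if 224 ≤ o1 then false
    else true

-- ===== PRECONDITION & SPEC =====
def Spec_is_public_ip_py (ip : String) (out : Bool) : Prop := out = is_public_ip_py_alt ip
instance (ip : String) (out : Bool) : Decidable (Spec_is_public_ip_py ip out) := by unfold Spec_is_public_ip_py; infer_instance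

-- ===== CLAIM (what is proved, stated in full; the proofs are below) =====
def Claim_equal_is_public_ip_py : Prop := ∀ (ip : String), Dom_is_public_ip_py ip → Spec_is_public_ip_py ip (is_public_ip_py ip)

-- ===== LEMMAS AND PROOFS =====

lemma pvDigitBounds (c : Char) (h : PySem.Chars.isdigit c = true) :
    48 ≤ (c.toNat : Int) ∧ (c.toNat : Int) ≤ 57 := by
  simp only [PySem.Chars.isdigit, Bool.and_eq_true, decide_eq_true_eq, Char.le_def,
    UInt32.le_iff_toNat_le] at h
  have e0 : '0'.val.toNat = 48 := rfl
  have e9 : '9'.val.toNat = 57 := rfl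
  simp only [Char.toNat]
  omega

lemma pvFoldlDigits_nonneg (cs : List Char) (h : cs.all PySem.Chars.isdigit = true) :
    ∀ a : Int, 0 ≤ a → 0 ≤ cs.foldl (fun a c => a * 10 + ((c.toNat : Int) - 48)) a := by
  induction cs with
  | nil => intro a ha; simpa using ha
  | cons c cs ih =>
    simp only [List.all_cons, Bool.and_eq_true] at h
    intro a ha
    have hc := pvDigitBounds c h.1
    exact ih h.2 _ (by nlinarith [hc.1, hc.2])

lemma pvParseOctet_bounds (cs : List Char) (v : Int) (h : pvParseOctet cs = some v) :
    0 ≤ v ∧ v ≤ 255 := by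
  unfold pvParseOctet at h
  split_ifs at h with h1 h2 h3 h4 h5
  have hnn := pvFoldlDigits_nonneg cs h3 0 le_rfl
  injection h with h
  omega

lemma pvParseIPv4_bounds (ip : String) (a b c d : Int)
    (h : pvParseIPv4 ip = some (a, b, c, d)) :
    (0 ≤ a ∧ a ≤ 255) ∧ (0 ≤ b ∧ b ≤ 255) ∧ (0 ≤ c ∧ c ≤ 255) ∧ (0 ≤ d ∧ d ≤ 255) := by
  unfold pvParseIPv4 at h
  split at h
  case _ p1 p2 p3 p4 =>
    split at h
    case _ a' b' c' d' h1 h2 h3 h4 =>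
      injection h with h
      obtain ⟨rfl, rfl, rfl, rfl⟩ : a' = a ∧ b' = b ∧ c' = c ∧ d' = d := by
        simpa [Prod.ext_iff] using h
      exact ⟨pvParseOctet_bounds _ _ h1, pvParseOctet_bounds _ _ h2,
        pvParseOctet_bounds _ _ h3, pvParseOctet_bounds _ _ h4⟩
    case _ => exact absurd h (by simp)
  case _ => exact absurd h (by simp)

lemma pvClassify (o1 o2 o3 o4 : Int)
    (h1 : 0 ≤ o1 ∧ o1 ≤ 255) (h2 : 0 ≤ o2 ∧ o2 ≤ 255)
    (h3 : 0 ≤ o3 ∧ o3 ≤ 255) (h4 : 0 ≤ o4 ∧ o4 ≤ 255) :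
    (if pvNetworks.any (pvInNetwork (((o1 * 256 + o2) * 256 + o3) * 256 + o4)) then false else true)
    = (if o1 = 0 ∨ o1 = 10 ∨ o1 = 127 then false
       else if o1 = 172 ∧ 16 ≤ o2 ∧ o2 ≤ 31 then false
       else if o1 = 192 ∧ o2 = 168 then false
       else if o1 = 169 ∧ o2 = 254 then false
       else if 224 ≤ o1 then false
       else true) := by
  have h28 : ∀ m : Int, PySem.Int.floordiv m 268435456 = m / 268435456 :=
    fun m => PySem.Int.floordiv_eq_ediv_of_pos (by norm_num)
  have h24 : ∀ m : Int, PySem.Int.floordiv m 16777216 = m / 16777216 :=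
    fun m => PySem.Int.floordiv_eq_ediv_of_pos (by norm_num)
  have h20 : ∀ m : Int, PySem.Int.floordiv m 1048576 = m / 1048576 :=
    fun m => PySem.Int.floordiv_eq_ediv_of_pos (by norm_num)
  have h16 : ∀ m : Int, PySem.Int.floordiv m 65536 = m / 65536 :=
    fun m => PySem.Int.floordiv_eq_ediv_of_pos (by norm_num)
  simp only [pvNetworks, pvInNetwork, List.any_cons, List.any_nil, Bool.or_false]
  norm_num [h28, h24, h20, h16]
  rw [Bool.eq_iff_iff]
  simp only [Bool.and_eq_true, Bool.or_eq_true, Bool.not_eq_true', decide_eq_false_iff_not]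
  omega

-- ===== VERDICT (by name: the statement is the Claim_ definition above) =====
theorem is_public_ip_py_spec : Claim_equal_is_public_ip_py := by
  intro ip _
  unfold Spec_is_public_ip_py is_public_ip_py is_public_ip_py_alt
  cases h : pvParseIPv4 ip with
  | none => rfl
  | some q =>
    obtain ⟨o1, o2, o3, o4⟩ := q
    obtain ⟨h1, h2, h3, h4⟩ := pvParseIPv4_bounds ip o1 o2 o3 o4 h
    exact pvClassify o1 o2 o3 o4 h1 h2 h3 h4
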